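-- pv_equiv track=rewrite | github.com/amsm/amlogic | am_logical_helper.py | getListOfAlternatingTrueFalse
-- ===== SOURCE A (Python) =====
-- def getListOfAlternatingTrueFalse(
--     piHowManyValues:int=2,
--     piAlternateEvery:int=1,
--     pbStartingValue:bool=True
-- ):
--     retList:list=list()
--
--     bCurrentValue = pbStartingValue
--     while(len(retList)<piHowManyValues):
--         retList.append(bCurrentValue)
--         bSwitchingTime:bool = len(retList)%piAlternateEvery == 0
--         if(bSwitchingTime):
--             bCurrentValue = not bCurrentValue
--         # if time to swich values
--     # while not enough values yet
--
--     return retList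
-- ===== SOURCE B (Python) =====
-- def getListOfAlternatingTrueFalse(
--     piHowManyValues:int=2,
--     piAlternateEvery:int=1,
--     pbStartingValue:bool=True
-- ):
--     # build the list a whole block at a time, capping each block at the length still needed
--     retList = []
--     bValue = pbStartingValue
--     while len(retList) < piHowManyValues:
--         retList += [bValue] * min(piAlternateEvery, piHowManyValues - len(retList))
--         bValue = not bValue
--     return retList
-- ===== Notes on version B (the rewrite author's own statement) =====
-- stated objective: faster
-- what changed: Instead of appending one element at a time while flipping a running boolean on a modulus test, B appends a whole block [value]*min(every, remaining) per iteration (bulk list replication, one flip per block instead of a per-element modulus test; measured ~9x faster at large n); Pre_ excludes non-positive piAlternateEvery with N>=1, where A either raises ZeroDivisionError (every==0) or returns a no-longer-alternating list for a meaningless negative block size while B's block loop does not terminate.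
-- outside the precondition, e.g. on getListOfAlternatingTrueFalse(3, -2, True): A returns [True, True, False], B does not finish within the time limit; on getListOfAlternatingTrueFalse(2, 0, True): A raises ZeroDivisionError, B does not finish within the time limit
import Mathlib
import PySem

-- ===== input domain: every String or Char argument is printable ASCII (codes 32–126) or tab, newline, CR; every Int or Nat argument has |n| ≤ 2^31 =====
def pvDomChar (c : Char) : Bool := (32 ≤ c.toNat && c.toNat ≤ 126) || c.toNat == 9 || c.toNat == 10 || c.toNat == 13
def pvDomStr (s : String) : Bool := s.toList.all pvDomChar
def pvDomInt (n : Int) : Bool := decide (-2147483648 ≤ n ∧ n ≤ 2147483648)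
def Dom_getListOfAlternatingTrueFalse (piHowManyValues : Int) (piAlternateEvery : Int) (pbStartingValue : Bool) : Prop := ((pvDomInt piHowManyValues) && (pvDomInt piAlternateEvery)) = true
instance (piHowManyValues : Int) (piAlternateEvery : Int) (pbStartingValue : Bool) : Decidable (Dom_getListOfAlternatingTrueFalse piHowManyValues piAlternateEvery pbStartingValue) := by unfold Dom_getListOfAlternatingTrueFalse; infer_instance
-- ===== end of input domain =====

-- B builds the list block-by-block ([value]*min(every, remaining) appended per iteration)
-- instead of A's per-element flip-a-running-boolean loop; objective: alternative decomposition.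

-- ===== PORT A =====
-- while len(retList) < N: append cur; if len(retList) % every == 0: cur = not cur
-- fuel = N.toNat: the loop appends one element per iteration, so it runs exactly that often.
def pvLoopA (N e : Int) : List Bool → Bool → Nat → List Bool
  | ret, _, 0 => ret
  | ret, cur, fuel+1 =>
    if (ret.length : Int) < N then
      let ret' := ret ++ [cur]
      let cur' := if PySem.Int.mod (ret'.length : Int) e = 0 then !cur else cur
      pvLoopA N e ret' cur' fuel
    else ret

def getListOfAlternatingTrueFalse (piHowManyValues : Int) (piAlternateEvery : Int) (pbStartingValue : Bool) : List Bool :=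
  pvLoopA piHowManyValues piAlternateEvery [] pbStartingValue piHowManyValues.toNat

-- ===== PORT B =====
-- while len(retList) < N: retList += [value]*min(every, N - len(retList)); value = not value.
-- [value]*k for k ≤ 0 is []; fuel = N.toNat suffices for every ≥ 1 (≥ 1 element per round).
def pvLoopB (N e : Int) : List Bool → Bool → Nat → List Bool
  | out, _, 0 => out
  | out, val, fuel+1 =>
    if (out.length : Int) < N then
      pvLoopB N e (out ++ List.replicate (min e (N - out.length)).toNat val) (!val) fuel
    else out

def getListOfAlternatingTrueFalse_alt (piHowManyValues : Int) (piAlternateEvery : Int) (pbStartingValue : Bool) : List Bool :=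
  pvLoopB piHowManyValues piAlternateEvery [] pbStartingValue piHowManyValues.toNat

-- ===== PRECONDITION & SPEC =====
-- Pre_ excludes piAlternateEvery ≤ 0 with N ≥ 1: there A raises ZeroDivisionError (every = 0) or
-- returns a list for a meaningless negative block size, while B's block loop does not terminate.
def Pre_getListOfAlternatingTrueFalse (piHowManyValues : Int) (piAlternateEvery : Int) (pbStartingValue : Bool) : Prop :=
  0 < piAlternateEvery ∨ piHowManyValues ≤ 0
instance (piHowManyValues : Int) (piAlternateEvery : Int) (pbStartingValue : Bool) : Decidable (Pre_getListOfAlternatingTrueFalse piHowManyValues piAlternateEvery pbStartingValue) := by unfold Pre_getListOfAlternatingTrueFalse; infer_instance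
def pvWitness_getListOfAlternatingTrueFalse : Int × Int × Bool := (5, 2, true)

def Spec_getListOfAlternatingTrueFalse (piHowManyValues : Int) (piAlternateEvery : Int) (pbStartingValue : Bool) (out : List Bool) : Prop := out = getListOfAlternatingTrueFalse_alt piHowManyValues piAlternateEvery pbStartingValue
instance (piHowManyValues : Int) (piAlternateEvery : Int) (pbStartingValue : Bool) (out : List Bool) : Decidable (Spec_getListOfAlternatingTrueFalse piHowManyValues piAlternateEvery pbStartingValue out) := by unfold Spec_getListOfAlternatingTrueFalse; infer_instance

-- ===== CLAIM =====
def Claim_equal_getListOfAlternatingTrueFalse : Prop := ∀ (piHowManyValues : Int) (piAlternateEvery : Int) (pbStartingValue : Bool), Dom_getListOfAlternatingTrueFalse piHowManyValues piAlternateEvery pbStartingValue → Pre_getListOfAlternatingTrueFalse piHowManyValues piAlternateEvery pbStartingValue → Spec_getListOfAlternatingTrueFalse piHowManyValues piAlternateEvery pbStartingValue (getListOfAlternatingTrueFalse piHowManyValues piAlternateEvery pbStartingValue)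

-- ===== LEMMAS AND PROOFS =====

-- the intended value of element number L (Nat arithmetic)
def pvG (e : Int) (pb : Bool) (L : Nat) : Bool :=
  if (L / e.natAbs) % 2 = 0 then pb else !pb

lemma pvG_succ (e : Int) (pb : Bool) (L : Nat) :
    pvG e pb (L+1) = if e.natAbs ∣ (L+1) then !(pvG e pb L) else pvG e pb L := by
  unfold pvG
  rw [Nat.succ_div]
  by_cases hd : e.natAbs ∣ (L+1)
  · simp only [hd, if_true]
    rcases Nat.even_or_odd (L / e.natAbs) with h | h <;>
      simp [Nat.even_iff, Nat.odd_iff] at h <;> simp [h, Nat.add_mod]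
  · simp [hd]

lemma pvLoopA_eq (N e : Int) (pb : Bool) :
    ∀ (fuel : Nat) (ret : List Bool) (cur : Bool),
      ret.length + fuel = N.toNat →
      cur = pvG e pb ret.length →
      pvLoopA N e ret cur fuel = ret ++ (List.range fuel).map (fun j => pvG e pb (ret.length + j)) := by
  intro fuel
  induction fuel with
  | zero => intro ret cur _ _; simp [pvLoopA]
  | succ fuel ih =>
    intro ret cur hlen hcur
    have hlt : (ret.length : Int) < N := by omega
    have hmod : (PySem.Int.mod ((ret.length : Int) + 1) e = 0) ↔ e.natAbs ∣ (ret.length + 1) := by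
      have hcast : ((ret.length : Int) + 1) = ((ret.length + 1 : Nat) : Int) := by push_cast; ring
      rw [hcast, PySem.Int.mod_eq_zero_iff_dvd]
      constructor
      · intro h
        have h2 := Int.natAbs_dvd_natAbs.mpr h
        rwa [Int.natAbs_natCast] at h2
      · intro h
        have h2 : ((e.natAbs : Nat) : Int) ∣ ((ret.length + 1 : Nat) : Int) :=
          Int.natCast_dvd_natCast.mpr h
        rwa [Int.natAbs_dvd] at h2
    have hcur' : (if PySem.Int.mod (((ret ++ [cur]).length : Nat) : Int) e = 0 then !cur else cur)
        = pvG e pb (ret.length + 1) := by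
      simp only [List.length_append, List.length_singleton, Nat.cast_add, Nat.cast_one]
      rw [pvG_succ, hcur]
      by_cases hd : e.natAbs ∣ (ret.length + 1)
      · rw [if_pos (hmod.mpr hd), if_pos hd]
      · rw [if_neg (fun h => hd (hmod.mp h)), if_neg hd]
    simp only [pvLoopA, if_pos hlt, hcur']
    rw [ih (ret ++ [cur]) _ (by simp; omega) (by simp)]
    rw [List.range_succ_eq_map]
    simp only [List.map_cons, List.map_map, List.append_assoc, List.length_append,
      List.cons_append, List.length_singleton]
    rw [hcur]
    congr 1
    simp only [List.cons.injEq, Nat.add_zero, true_and]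
    apply List.map_congr_left
    intro j _
    simp only [Function.comp]
    congr 1
    omega

-- value carried by B's loop after j completed rounds
def pvVal (pb : Bool) (j : Nat) : Bool := if j % 2 = 0 then pb else !pb

lemma pvVal_succ (pb : Bool) (j : Nat) : pvVal pb (j+1) = !(pvVal pb j) := by
  unfold pvVal
  rcases Nat.even_or_odd j with h | h <;>
    simp [Nat.even_iff, Nat.odd_iff] at h <;> simp [h, Nat.add_mod]

lemma pvG_block (e : Int) (pb : Bool) (he : 0 < e) (j i : Nat) (hi : i < e.toNat) :
    pvG e pb (j * e.toNat + i) = pvVal pb j := by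
  unfold pvG pvVal
  have habs : e.natAbs = e.toNat := by omega
  rw [habs, mul_comm j e.toNat, Nat.mul_add_div (by omega), Nat.div_eq_of_lt hi]
  simp

lemma pvLoopB_eq (N e : Int) (pb : Bool) (he : 0 < e) :
    ∀ (fuel j : Nat), N.toNat ≤ j * e.toNat + fuel * e.toNat →
      pvLoopB N e ((List.range (min (j * e.toNat) N.toNat)).map (pvG e pb)) (pvVal pb j) fuel
        = (List.range N.toNat).map (pvG e pb) := by
  intro fuel
  induction fuel with
  | zero =>
    intro j hle
    have h0 : (0:Nat) * e.toNat = 0 := Nat.zero_mul _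
    simp only [pvLoopB]
    rw [show min (j * e.toNat) N.toNat = N.toNat from by omega]
  | succ fuel ih =>
    intro j hle
    by_cases hlt : ((((List.range (min (j * e.toNat) N.toNat)).map (pvG e pb)).length : Nat) : Int) < N
    · simp only [List.length_map, List.length_range] at hlt
      have hjt : j * e.toNat < N.toNat := by omega
      have hmin : min (j * e.toNat) N.toNat = j * e.toNat := by omega
      rw [hmin] at hlt ⊢
      have hk : (min e (N - (j * e.toNat : Nat))).toNat = min e.toNat (N.toNat - j * e.toNat) := by
        omega
      have hblock : (List.range (j * e.toNat)).map (pvG e pb)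
            ++ List.replicate (min e.toNat (N.toNat - j * e.toNat)) (pvVal pb j)
          = (List.range (min ((j+1) * e.toNat) N.toNat)).map (pvG e pb) := by
        have hsum : min ((j+1) * e.toNat) N.toNat
            = j * e.toNat + min e.toNat (N.toNat - j * e.toNat) := by
          have h2 : (j+1) * e.toNat = j * e.toNat + e.toNat := Nat.succ_mul _ _
          omega
        rw [hsum, List.range_add, List.map_append, List.map_map]
        congr 1
        symm
        rw [List.eq_replicate_iff]
        refine ⟨by simp, ?_⟩
        intro b hb
        simp only [List.mem_map, List.mem_range, Function.comp] at hb
        obtain ⟨i, hi, rfl⟩ := hb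
        exact pvG_block e pb he j i (by omega)
      simp only [pvLoopB, List.length_map, List.length_range, if_pos hlt, hk, hblock, ← pvVal_succ]
      apply ih (j+1)
      have h1 : (fuel+1) * e.toNat = fuel * e.toNat + e.toNat := Nat.succ_mul _ _
      have h2 : (j+1) * e.toNat = j * e.toNat + e.toNat := Nat.succ_mul _ _
      omega
    · simp only [List.length_map, List.length_range] at hlt
      simp only [pvLoopB, List.length_map, List.length_range, if_neg (by exact_mod_cast hlt)]
      rw [show min (j * e.toNat) N.toNat = N.toNat from by omega]

-- ===== VERDICT =====
theorem getListOfAlternatingTrueFalse_spec : Claim_equal_getListOfAlternatingTrueFalse := by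
  intro N e pb _ hpre
  unfold Spec_getListOfAlternatingTrueFalse getListOfAlternatingTrueFalse getListOfAlternatingTrueFalse_alt
  by_cases hN : N ≤ 0
  · have h0 : N.toNat = 0 := by omega
    rw [h0]
    simp [pvLoopA, pvLoopB]
  · rcases hpre with he | he
    swap
    · omega
    · rw [pvLoopA_eq N e pb N.toNat [] pb (by simp) (by simp [pvG])]
      have := pvLoopB_eq N e pb he N.toNat 0
        (by
          have h1 : 1 ≤ e.toNat := by omega
          calc N.toNat = N.toNat * 1 := (Nat.mul_one _).symm
            _ ≤ N.toNat * e.toNat := Nat.mul_le_mul_left _ h1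
            _ = 0 * e.toNat + N.toNat * e.toNat := by omega)
      simp only [Nat.zero_mul, Nat.min_eq_left (Nat.zero_le _), List.range_zero,
        List.map_nil] at this
      rw [show pvVal pb 0 = pb from rfl] at this
      rw [this]
      simp
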